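-- pv_equiv track=rewrite | github.com/Dawid-Witkowski/WIT | 2023-2027/3 rok/5 sem/PPY/RK/Kolos 2/zad2/dziadekDzidek_ZLP_git.py | dziadekDzidek
-- ===== SOURCE A (Python) =====
-- def dziadekDzidek(tekst):
--     droga = ''.join(x for x in tekst if x in 'ZLP0123456789').replace('Z', 'PP').replace('P', ',P,').replace('L', ',L,')
--     droga = [x for x in droga.split(',') if x]
--     pozycja_x = pozycja_y = kierunek = 0
--     for komenda in droga:
--         if komenda == 'L':
--             kierunek += 90
--         elif komenda == 'P':
--             kierunek -= 90
--         else: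
--             ruch = int(komenda)
--             if kierunek % 360 == 0:
--                 pozycja_x += ruch
--             elif kierunek % 360 == 90:
--                 pozycja_y += ruch
--             elif kierunek % 360 == 180:
--                 pozycja_x -= ruch
--             else:
--                 pozycja_y -= ruch
--     return pozycja_x == 0 and pozycja_y == 0
-- ===== SOURCE B (Python) =====
-- def dziadekDzidek(tekst):
--     # One pass over the characters with a direction vector; no intermediate
--     # token list: digits are collected into `num`, a turn first flushes the
--     # pending move, 'Z' is a 180-degree turn.
--     x = y = 0
--     dx, dy = 1, 0
--     num = ''
--     for c in tekst:
--         if c in '0123456789':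
--             num += c
--         elif c in 'LPZ':
--             if num:
--                 n = int(num)
--                 x += dx * n
--                 y += dy * n
--                 num = ''
--             if c == 'L':
--                 dx, dy = -dy, dx
--             elif c == 'P':
--                 dx, dy = dy, -dx
--             else:
--                 dx, dy = -dx, -dy
--     if num:
--         n = int(num)
--         x += dx * n
--         y += dy * n
--     return x == 0 and y == 0
-- ===== Notes on version B (the rewrite author's own statement) =====
-- stated objective: simpler
-- what changed: A builds an intermediate token list via filter, three global string replacements (Z into two right turns, turns wrapped in commas) and a comma-split, then folds over the tokens with a heading angle mod 360; B makes a single pass over the characters, accumulating digit runs and maintaining the heading as a unit vector, flushing the pending move at each turn and at the end.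
import Mathlib
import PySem

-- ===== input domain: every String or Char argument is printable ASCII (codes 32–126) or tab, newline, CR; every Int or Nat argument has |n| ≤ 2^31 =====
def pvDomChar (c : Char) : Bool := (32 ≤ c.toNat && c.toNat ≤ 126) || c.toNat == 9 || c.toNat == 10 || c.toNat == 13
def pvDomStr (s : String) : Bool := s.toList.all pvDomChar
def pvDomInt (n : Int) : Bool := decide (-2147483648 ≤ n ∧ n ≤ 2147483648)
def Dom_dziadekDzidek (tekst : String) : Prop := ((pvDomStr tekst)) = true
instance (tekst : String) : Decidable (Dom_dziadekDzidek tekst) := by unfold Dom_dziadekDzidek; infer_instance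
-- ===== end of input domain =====

-- B replaces A's filter/replace/replace/split token pipeline and heading-angle arithmetic by a
-- single pass over the characters with a direction vector (objective: simpler); return values agree.

-- ===== PORT A =====
-- loop body of A's 'for komenda in droga'
def aStep (st : Int × Int × Int) (komenda : String) : Int × Int × Int :=
  let (px, py, k) := st
  if komenda = "L" then (px, py, k + 90)
  else if komenda = "P" then (px, py, k - 90)
  else
    let ruch := (PySem.Int.ofStr? komenda).getD 0
    if PySem.Int.mod k 360 = 0 then (px + ruch, py, k)
    else if PySem.Int.mod k 360 = 90 then (px, py + ruch, k)
    else if PySem.Int.mod k 360 = 180 then (px - ruch, py, k)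
    else (px, py - ruch, k)

def dziadekDzidek (tekst : String) : Bool :=
  let droga :=
    PySem.Str.join "" ((tekst.toList.filter
      (fun x => PySem.Str.isIn (String.ofList [x]) "ZLP0123456789")).map (fun x => String.ofList [x]))
  let droga := PySem.Str.replace (PySem.Str.replace (PySem.Str.replace droga "Z" "PP") "P" ",P,") "L" ",L,"
  let droga2 := ((PySem.Str.split? droga ",").getD []).filter (fun x => x ≠ "")  -- sep ≠ "": split? is some
  let r := droga2.foldl aStep (0, 0, 0)
  r.1 == 0 && r.2.1 == 0

-- ===== PORT B =====
-- loop body of B's 'for c in tekst'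
def bStep (st : Int × Int × Int × Int × List Char) (c : Char) : Int × Int × Int × Int × List Char :=
  let (x, y, dx, dy, num) := st
  if PySem.Str.isIn (String.ofList [c]) "0123456789" then
    (x, y, dx, dy, num ++ [c])
  else if PySem.Str.isIn (String.ofList [c]) "LPZ" then
    let (x, y, num) :=
      if num ≠ [] then
        let n := (PySem.Int.ofStr? (String.ofList num)).getD 0
        (x + dx * n, y + dy * n, ([] : List Char))
      else (x, y, num)
    if c = 'L' then (x, y, -dy, dx, num)
    else if c = 'P' then (x, y, dy, -dx, num)
    else (x, y, -dx, -dy, num)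
  else (x, y, dx, dy, num)

def dziadekDzidek_alt (tekst : String) : Bool :=
  let st := tekst.toList.foldl bStep (0, 0, 1, 0, [])
  let (x, y, dx, dy, num) := st
  let (x, y) :=
    if num ≠ [] then
      let n := (PySem.Int.ofStr? (String.ofList num)).getD 0
      (x + dx * n, y + dy * n)
    else (x, y)
  x == 0 && y == 0

-- ===== PRECONDITION & SPEC =====
def Spec_dziadekDzidek (tekst : String) (out : Bool) : Prop := out = dziadekDzidek_alt tekst
instance (tekst : String) (out : Bool) : Decidable (Spec_dziadekDzidek tekst out) := by unfold Spec_dziadekDzidek; infer_instance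

-- ===== CLAIM (what is proved, stated in full; the proofs are below) =====
def Claim_equal_dziadekDzidek : Prop := ∀ (tekst : String), Dom_dziadekDzidek tekst → Spec_dziadekDzidek tekst (dziadekDzidek tekst)

-- ===== LEMMAS AND PROOFS =====

theorem isIn_singleton (c : Char) (s : String) :
    PySem.Str.isIn (String.ofList [c]) s = decide (c ∈ s.toList) := by
  by_cases hm : c ∈ s.toList
  · simp only [hm, decide_true]
    rw [PySem.Str.isIn_iff_infix, String.toList_ofList]
    obtain ⟨l1, l2, hsl⟩ := List.append_of_mem hm
    exact ⟨l1, l2, by rw [hsl]; simp⟩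
  · simp only [hm, decide_false]
    rw [← Bool.not_eq_true, PySem.Str.isIn_iff_infix, String.toList_ofList]
    intro hinf
    exact hm (hinf.subset (by simp))

theorem repl_go (a : Char) (new : List Char) :
    ∀ (fuel : Nat) (l acc : List Char), l.length ≤ fuel →
      PySem.Chars.replace.go [a] new fuel l acc
        = acc.reverse ++ l.flatMap (fun c => if c = a then new else [c]) := by
  intro fuel
  induction fuel with
  | zero =>
    intro l acc h
    have : l = [] := by simpa using h
    subst this
    simp [PySem.Chars.replace.go]
  | succ f ih =>
    intro l acc h
    cases l with
    | nil => simp [PySem.Chars.replace.go]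
    | cons c t =>
      rw [PySem.Chars.replace.go]
      by_cases hc : c = a
      · subst hc
        have hpre : [c].isPrefixOf (c :: t) = true := by simp [List.isPrefixOf]
        rw [if_pos hpre]
        rw [ih _ _ (by simpa using h)]
        simp
      · have hpre : [a].isPrefixOf (c :: t) = false := by
          simp [List.isPrefixOf]
          exact fun h' => hc h'.symm
        rw [if_neg (by simp [hpre])]
        rw [ih _ _ (by simpa using Nat.le_of_succ_le_succ h)]
        simp [hc]

theorem repl_single (s : List Char) (a : Char) (new : List Char) :
    PySem.Chars.replace s [a] new = s.flatMap (fun c => if c = a then new else [c]) := by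
  rw [PySem.Chars.replace]
  simp only [List.isEmpty_cons, if_neg]
  exact repl_go a new s.length s [] le_rfl

def sp1 : List Char → List (List Char)
  | [] => [[]]
  | c :: t => if c = ',' then [] :: sp1 t else (sp1 t).modifyHead (c :: ·)

theorem split_go :
    ∀ (fuel : Nat) (l cur : List Char) (acc : List (List Char)), l.length + 1 ≤ fuel →
      PySem.Chars.splitOn.go [','] fuel l cur acc
        = acc.reverse ++ (sp1 l).modifyHead (cur.reverse ++ ·) := by
  intro fuel
  induction fuel with
  | zero => intro l cur acc h; omega
  | succ f ih =>
    intro l cur acc h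
    cases l with
    | nil =>
      rw [PySem.Chars.splitOn.go]
      · simp [sp1, List.modifyHead]
      · omega
    | cons c t =>
      rw [PySem.Chars.splitOn.go]
      by_cases hc : c = ','
      · subst hc
        rw [if_pos (by simp [List.isPrefixOf])]
        rw [ih _ _ _ (by simpa using Nat.le_of_succ_le_succ h)]
        simp [sp1, List.modifyHead]
        cases sp1 t <;> simp [List.modifyHead]
      · have hpre : [','].isPrefixOf (c :: t) = false := by
          simp [List.isPrefixOf]
          exact fun h' => hc h'.symm
        rw [if_neg (by simp [hpre])]
        rw [ih _ _ _ (Nat.le_of_succ_le_succ h)]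
        simp [sp1, hc]
        cases sp1 t <;> simp [List.modifyHead]

theorem splitOn_comma (s : List Char) : PySem.Chars.splitOn s [','] = sp1 s := by
  rw [PySem.Chars.splitOn]
  rw [split_go _ _ _ _ (by omega)]
  simp
  cases sp1 s <;> simp [List.modifyHead]

def predZ (c : Char) : Bool := decide (c ∈ "ZLP0123456789".toList)
def expZ (c : Char) : List Char :=
  if c = 'Z' then ",P,,P,".toList
  else if c = 'P' then ",P,".toList
  else if c = 'L' then ",L,".toList
  else [c]
def ivalZ (t : List Char) : Int := (PySem.Int.ofChars? t).getD 0
def dirZ (k : Int) : Int × Int :=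
  if PySem.Int.mod k 360 = 0 then (1, 0)
  else if PySem.Int.mod k 360 = 90 then (0, 1)
  else if PySem.Int.mod k 360 = 180 then (-1, 0)
  else (0, -1)

theorem dirZ_L (k : Int) (hk : PySem.Int.mod k 90 = 0) :
    dirZ (k + 90) = (-(dirZ k).2, (dirZ k).1) := by
  rw [PySem.Int.mod_eq_emod_of_pos (by norm_num)] at hk
  unfold dirZ
  simp only [PySem.Int.mod_eq_emod_of_pos (by norm_num : (0:Int) < 360)]
  have h4 : k % 360 = 0 ∨ k % 360 = 90 ∨ k % 360 = 180 ∨ k % 360 = 270 := by omega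
  rcases h4 with h | h | h | h <;>
    · rw [show (k + 90) % 360 = if k % 360 = 270 then 0 else k % 360 + 90 by omega]
      simp only [h]
      norm_num

theorem dirZ_P (k : Int) (hk : PySem.Int.mod k 90 = 0) :
    dirZ (k - 90) = ((dirZ k).2, -(dirZ k).1) := by
  rw [PySem.Int.mod_eq_emod_of_pos (by norm_num)] at hk
  unfold dirZ
  simp only [PySem.Int.mod_eq_emod_of_pos (by norm_num : (0:Int) < 360)]
  have h4 : k % 360 = 0 ∨ k % 360 = 90 ∨ k % 360 = 180 ∨ k % 360 = 270 := by omega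
  rcases h4 with h | h | h | h <;>
    · rw [show (k - 90) % 360 = if k % 360 = 0 then 270 else k % 360 - 90 by omega]
      simp only [h]
      norm_num

theorem mod90_L (k : Int) (hk : PySem.Int.mod k 90 = 0) : PySem.Int.mod (k + 90) 90 = 0 := by
  rw [PySem.Int.mod_eq_emod_of_pos (by norm_num)] at *
  omega

theorem mod90_P (k : Int) (hk : PySem.Int.mod k 90 = 0) : PySem.Int.mod (k - 90) 90 = 0 := by
  rw [PySem.Int.mod_eq_emod_of_pos (by norm_num)] at *
  omega


def aStepL (st : Int × Int × Int) (t : List Char) : Int × Int × Int :=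
  let (px, py, k) := st
  if t = ['L'] then (px, py, k + 90)
  else if t = ['P'] then (px, py, k - 90)
  else
    let ruch := ivalZ t
    if PySem.Int.mod k 360 = 0 then (px + ruch, py, k)
    else if PySem.Int.mod k 360 = 90 then (px, py + ruch, k)
    else if PySem.Int.mod k 360 = 180 then (px - ruch, py, k)
    else (px, py - ruch, k)


def aFinish (st : Int × Int × Int) : Bool := st.1 == 0 && st.2.1 == 0

def bFinish (st : Int × Int × Int × Int × List Char) : Bool :=
  let (x, y, dx, dy, num) := st
  let (x, y) :=
    if num ≠ [] then
      let n := ivalZ num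
      (x + dx * n, y + dy * n)
    else (x, y)
  x == 0 && y == 0

theorem ofList_eq_iff (t : List Char) (u : List Char) :
    (String.ofList t = String.ofList u) ↔ t = u := by
  constructor
  · intro h
    have := congrArg String.toList h
    simpa using this
  · intro h; rw [h]

theorem aStep_ofList (st : Int × Int × Int) (t : List Char) :
    aStep st (String.ofList t) = aStepL st t := by
  obtain ⟨px, py, k⟩ := st
  have hL : (String.ofList t = "L") ↔ t = ['L'] := by
    rw [show ("L" : String) = String.ofList ['L'] from rfl, ofList_eq_iff]
  have hP : (String.ofList t = "P") ↔ t = ['P'] := by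
    rw [show ("P" : String) = String.ofList ['P'] from rfl, ofList_eq_iff]
  simp only [aStep, aStepL, PySem.Int.ofStr?, String.toList_ofList, ivalZ]
  by_cases h1 : t = ['L']
  · simp [h1, hL]
  · by_cases h2 : t = ['P']
    · simp [h2, hP, hL]
    · simp [hL, hP, h1, h2]

theorem aStepL_move (x y k : Int) (t : List Char) (h1 : t ≠ ['L']) (h2 : t ≠ ['P']) :
    aStepL (x, y, k) t = (x + (dirZ k).1 * ivalZ t, y + (dirZ k).2 * ivalZ t, k) := by
  simp only [aStepL, dirZ, h1, h2, if_false]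
  split_ifs <;> simp <;> ring

theorem bStep_noop (st : Int × Int × Int × Int × List Char) (c : Char) (hc : predZ c = false) :
    bStep st c = st := by
  obtain ⟨x, y, dx, dy, num⟩ := st
  simp only [predZ, decide_eq_false_iff_not] at hc
  rw [show "ZLP0123456789".toList = ['Z','L','P','0','1','2','3','4','5','6','7','8','9'] from rfl] at hc
  simp only [List.mem_cons, List.not_mem_nil, or_false, not_or] at hc
  simp only [bStep, isIn_singleton]
  rw [show "0123456789".toList = ['0','1','2','3','4','5','6','7','8','9'] from rfl,
      show "LPZ".toList = ['L','P','Z'] from rfl]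
  simp only [List.mem_cons, List.not_mem_nil, or_false]
  obtain ⟨hZ, hL, hP, h0, h1, h2, h3, h4, h5, h6, h7, h8, h9⟩ := hc
  simp [hZ, hL, hP, h0, h1, h2, h3, h4, h5, h6, h7, h8, h9]

theorem foldl_bStep_filter (cs : List Char) :
    ∀ st, cs.foldl bStep st = (cs.filter predZ).foldl bStep st := by
  induction cs with
  | nil => intro st; rfl
  | cons c t ih =>
    intro st
    by_cases hc : predZ c = true
    · simp [List.filter_cons, hc, List.foldl_cons, ih]
    · simp only [Bool.not_eq_true] at hc
      simp [List.filter_cons, hc, List.foldl_cons, bStep_noop _ _ hc, ih]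

theorem mh_nil (l : List (List Char)) : l.modifyHead (fun h => [] ++ h) = l := by
  cases l <;> simp [List.modifyHead]

theorem chars_isIn_singleton (c : Char) (l : List Char) :
    PySem.Chars.isIn [c] l = decide (c ∈ l) := by
  by_cases hm : c ∈ l
  · simp only [hm, decide_true]
    rw [PySem.Chars.isIn_iff_infix]
    obtain ⟨l1, l2, hsl⟩ := List.append_of_mem hm
    exact ⟨l1, l2, by rw [hsl]; simp⟩
  · simp only [hm, decide_false]
    rw [← Bool.not_eq_true, PySem.Chars.isIn_iff_infix]
    intro hinf; exact hm (hinf.subset (by simp))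

theorem aStepL_P (a b c : Int) : aStepL (a, b, c) ['P'] = (a, b, c - 90) := by
  simp [aStepL]

theorem aStepL_L (a b c : Int) : aStepL (a, b, c) ['L'] = (a, b, c + 90) := by
  simp [aStepL]

theorem bStep_digit (x y dx dy : Int) (pend : List Char) (c : Char)
    (h : c ∈ "0123456789".toList) :
    bStep (x, y, dx, dy, pend) c = (x, y, dx, dy, pend ++ [c]) := by
  have h' : c ∈ ['0','1','2','3','4','5','6','7','8','9'] := h
  simp [bStep, chars_isIn_singleton, isIn_singleton, h']

theorem bStep_L (x y dx dy : Int) (pend : List Char) :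
    bStep (x, y, dx, dy, pend) 'L'
      = if pend = [] then (x, y, -dy, dx, pend)
        else (x + dx * ivalZ pend, y + dy * ivalZ pend, -dy, dx, ([] : List Char)) := by
  rw [show bStep (x, y, dx, dy, pend) 'L'
        = (let (x, y, num) :=
             if pend ≠ [] then
               (x + dx * ((PySem.Int.ofStr? (String.ofList pend)).getD 0),
                y + dy * ((PySem.Int.ofStr? (String.ofList pend)).getD 0), ([] : List Char))
             else (x, y, pend)
           (x, y, -dy, dx, num)) by
        simp only [bStep,
          show PySem.Str.isIn (String.ofList ['L']) "0123456789" = false from by decide,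
          show PySem.Str.isIn (String.ofList ['L']) "LPZ" = true from by decide]
        simp]
  by_cases hp : pend = [] <;> simp [hp, ivalZ, PySem.Int.ofStr?]

theorem bStep_P (x y dx dy : Int) (pend : List Char) :
    bStep (x, y, dx, dy, pend) 'P'
      = if pend = [] then (x, y, dy, -dx, pend)
        else (x + dx * ivalZ pend, y + dy * ivalZ pend, dy, -dx, ([] : List Char)) := by
  rw [show bStep (x, y, dx, dy, pend) 'P'
        = (let (x, y, num) :=
             if pend ≠ [] then
               (x + dx * ((PySem.Int.ofStr? (String.ofList pend)).getD 0),
                y + dy * ((PySem.Int.ofStr? (String.ofList pend)).getD 0), ([] : List Char))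
             else (x, y, pend)
           (x, y, dy, -dx, num)) by
        simp only [bStep,
          show PySem.Str.isIn (String.ofList ['P']) "0123456789" = false from by decide,
          show PySem.Str.isIn (String.ofList ['P']) "LPZ" = true from by decide]
        simp]
  by_cases hp : pend = [] <;> simp [hp, ivalZ, PySem.Int.ofStr?]

theorem bStep_Z (x y dx dy : Int) (pend : List Char) :
    bStep (x, y, dx, dy, pend) 'Z'
      = if pend = [] then (x, y, -dx, -dy, pend)
        else (x + dx * ivalZ pend, y + dy * ivalZ pend, -dx, -dy, ([] : List Char)) := by
  rw [show bStep (x, y, dx, dy, pend) 'Z'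
        = (let (x, y, num) :=
             if pend ≠ [] then
               (x + dx * ((PySem.Int.ofStr? (String.ofList pend)).getD 0),
                y + dy * ((PySem.Int.ofStr? (String.ofList pend)).getD 0), ([] : List Char))
             else (x, y, pend)
           (x, y, -dx, -dy, num)) by
        simp only [bStep,
          show PySem.Str.isIn (String.ofList ['Z']) "0123456789" = false from by decide,
          show PySem.Str.isIn (String.ofList ['Z']) "LPZ" = true from by decide]
        simp]
  by_cases hp : pend = [] <;> simp [hp, ivalZ, PySem.Int.ofStr?]

theorem expZ_of_digit (c : Char) (h1 : c ≠ 'Z') (h2 : c ≠ 'P') (h3 : c ≠ 'L') :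
    expZ c = [c] := by
  simp [expZ, h1, h2, h3]

theorem sp1_cons (c : Char) (r : List Char) (h : c ≠ ',') :
    sp1 (c :: r) = (sp1 r).modifyHead (fun h => c :: h) := by
  simp [sp1, h]

theorem mh_comp (pend : List Char) (c : Char) (l : List (List Char)) :
    (l.modifyHead (fun h => c :: h)).modifyHead (fun h => pend ++ h)
      = l.modifyHead (fun h => (pend ++ [c]) ++ h) := by
  cases l <;> simp

theorem main_sim :
    ∀ (fcs : List Char), (∀ c ∈ fcs, predZ c = true) →
      ∀ (x y k : Int) (pend : List Char), PySem.Int.mod k 90 = 0 →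
        (∀ c ∈ pend, c ∈ "0123456789".toList) →
        bFinish (fcs.foldl bStep (x, y, (dirZ k).1, (dirZ k).2, pend))
          = aFinish ((((sp1 (fcs.flatMap expZ)).modifyHead (fun h => pend ++ h)).filter (· ≠ [])).foldl aStepL (x, y, k)) := by
  intro fcs
  induction fcs with
  | nil =>
    intro _ x y k pend hk hpd
    have hpL : pend ≠ ['L'] := by
      intro h; rw [h] at hpd; exact absurd (hpd 'L' (by simp)) (by decide)
    have hpP : pend ≠ ['P'] := by
      intro h; rw [h] at hpd; exact absurd (hpd 'P' (by simp)) (by decide)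
    by_cases hp : pend = []
    · subst hp
      simp [sp1, List.modifyHead, bFinish, aFinish]
    · simp only [List.flatMap_nil, List.foldl_nil, sp1, List.modifyHead, List.append_nil]
      rw [List.filter_cons_of_pos (by simpa using hp)]
      simp only [List.filter_nil, List.foldl_cons, List.foldl_nil]
      rw [aStepL_move _ _ _ _ hpL hpP]
      simp [bFinish, aFinish, hp]
  | cons c t ih =>
    intro hall x y k pend hk hpd
    have hc := hall c (by simp)
    have hall' : ∀ c ∈ t, predZ c = true := fun d hd => hall d (by simp [hd])
    have hpL : pend ≠ ['L'] := by
      intro h; rw [h] at hpd; exact absurd (hpd 'L' (by simp)) (by decide)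
    have hpP : pend ≠ ['P'] := by
      intro h; rw [h] at hpd; exact absurd (hpd 'P' (by simp)) (by decide)
    simp only [predZ, decide_eq_true_eq] at hc
    rw [show "ZLP0123456789".toList = ['Z','L','P','0','1','2','3','4','5','6','7','8','9'] from rfl] at hc
    simp only [List.mem_cons, List.not_mem_nil, or_false] at hc
    rcases hc with rfl | rfl | rfl | rfl | rfl | rfl | rfl | rfl | rfl | rfl | rfl | rfl | rfl
    -- 'Z'
    · rw [List.foldl_cons, bStep_Z]
      have hd2 : dirZ (k - 90 - 90) = (-(dirZ k).1, -(dirZ k).2) := by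
        rw [dirZ_P _ (mod90_P _ hk), dirZ_P _ hk]
      have hd2a : (dirZ (k - 90 - 90)).1 = -(dirZ k).1 := by rw [hd2]
      have hd2b : (dirZ (k - 90 - 90)).2 = -(dirZ k).2 := by rw [hd2]
      have hk2 : PySem.Int.mod (k - 90 - 90) 90 = 0 := mod90_P _ (mod90_P _ hk)
      rw [List.flatMap_cons, show expZ 'Z' = [',','P',',',',','P',','] from rfl]
      simp only [List.cons_append, List.nil_append]
      rw [show ∀ r, sp1 (','::'P'::','::','::'P'::','::r)
            = [] :: ['P'] :: [] :: ['P'] :: sp1 r from fun r => by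
            simp [sp1, List.modifyHead]]
      simp only [List.modifyHead, List.append_nil]
      by_cases hp : pend = []
      · rw [if_pos hp]; subst hp
        rw [show ∀ r, List.filter (· ≠ []) ([] :: (['P'] : List Char) :: [] :: ['P'] :: r)
              = ['P'] :: ['P'] :: List.filter (· ≠ []) r from fun r => by simp]
        rw [List.foldl_cons, List.foldl_cons, aStepL_P, aStepL_P]
        have := ih hall' x y (k - 90 - 90) [] hk2 (by simp)
        rw [mh_nil, hd2a, hd2b] at this
        simpa using this
      · rw [if_neg hp]
        rw [show List.filter (· ≠ []) (pend :: (['P'] : List Char) :: [] :: ['P'] :: sp1 (List.flatMap expZ t))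
              = pend :: ['P'] :: ['P'] :: List.filter (· ≠ []) (sp1 (List.flatMap expZ t)) from by simp [hp]]
        rw [List.foldl_cons, aStepL_move x y k pend hpL hpP, List.foldl_cons, aStepL_P,
            List.foldl_cons, aStepL_P]
        have := ih hall' (x + (dirZ k).1 * ivalZ pend) (y + (dirZ k).2 * ivalZ pend)
          (k - 90 - 90) [] hk2 (by simp)
        rw [mh_nil, hd2a, hd2b] at this
        simpa using this
    -- 'L'
    · rw [List.foldl_cons, bStep_L]
      have hd2 : dirZ (k + 90) = (-(dirZ k).2, (dirZ k).1) := dirZ_L _ hk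
      have hd2a : (dirZ (k + 90)).1 = -(dirZ k).2 := by rw [hd2]
      have hd2b : (dirZ (k + 90)).2 = (dirZ k).1 := by rw [hd2]
      have hk2 : PySem.Int.mod (k + 90) 90 = 0 := mod90_L _ hk
      rw [List.flatMap_cons, show expZ 'L' = [',','L',','] from rfl]
      simp only [List.cons_append, List.nil_append]
      rw [show ∀ r, sp1 (','::'L'::','::r) = [] :: ['L'] :: sp1 r from fun r => by
            simp [sp1, List.modifyHead]]
      simp only [List.modifyHead, List.append_nil]
      by_cases hp : pend = []
      · rw [if_pos hp]; subst hp
        rw [show ∀ r, List.filter (· ≠ []) ([] :: (['L'] : List Char) :: r)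
              = ['L'] :: List.filter (· ≠ []) r from fun r => by simp]
        rw [List.foldl_cons, aStepL_L]
        have := ih hall' x y (k + 90) [] hk2 (by simp)
        rw [mh_nil, hd2a, hd2b] at this
        simpa using this
      · rw [if_neg hp]
        rw [show List.filter (· ≠ []) (pend :: (['L'] : List Char) :: sp1 (List.flatMap expZ t))
              = pend :: ['L'] :: List.filter (· ≠ []) (sp1 (List.flatMap expZ t)) from by simp [hp]]
        rw [List.foldl_cons, aStepL_move x y k pend hpL hpP, List.foldl_cons, aStepL_L]
        have := ih hall' (x + (dirZ k).1 * ivalZ pend) (y + (dirZ k).2 * ivalZ pend)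
          (k + 90) [] hk2 (by simp)
        rw [mh_nil, hd2a, hd2b] at this
        simpa using this
    -- 'P'
    · rw [List.foldl_cons, bStep_P]
      have hd2 : dirZ (k - 90) = ((dirZ k).2, -(dirZ k).1) := dirZ_P _ hk
      have hd2a : (dirZ (k - 90)).1 = (dirZ k).2 := by rw [hd2]
      have hd2b : (dirZ (k - 90)).2 = -(dirZ k).1 := by rw [hd2]
      have hk2 : PySem.Int.mod (k - 90) 90 = 0 := mod90_P _ hk
      rw [List.flatMap_cons, show expZ 'P' = [',','P',','] from rfl]
      simp only [List.cons_append, List.nil_append]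
      rw [show ∀ r, sp1 (','::'P'::','::r) = [] :: ['P'] :: sp1 r from fun r => by
            simp [sp1, List.modifyHead]]
      simp only [List.modifyHead, List.append_nil]
      by_cases hp : pend = []
      · rw [if_pos hp]; subst hp
        rw [show ∀ r, List.filter (· ≠ []) ([] :: (['P'] : List Char) :: r)
              = ['P'] :: List.filter (· ≠ []) r from fun r => by simp]
        rw [List.foldl_cons, aStepL_P]
        have := ih hall' x y (k - 90) [] hk2 (by simp)
        rw [mh_nil, hd2a, hd2b] at this
        simpa using this
      · rw [if_neg hp]
        rw [show List.filter (· ≠ []) (pend :: (['P'] : List Char) :: sp1 (List.flatMap expZ t))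
              = pend :: ['P'] :: List.filter (· ≠ []) (sp1 (List.flatMap expZ t)) from by simp [hp]]
        rw [List.foldl_cons, aStepL_move x y k pend hpL hpP, List.foldl_cons, aStepL_P]
        have := ih hall' (x + (dirZ k).1 * ivalZ pend) (y + (dirZ k).2 * ivalZ pend)
          (k - 90) [] hk2 (by simp)
        rw [mh_nil, hd2a, hd2b] at this
        simpa using this
    -- digits
    all_goals
      rw [List.foldl_cons]
      rw [bStep_digit _ _ _ _ _ _ (by decide)]
      rw [List.flatMap_cons, expZ_of_digit _ (by decide) (by decide) (by decide),
          List.singleton_append]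
      rw [sp1_cons _ _ (by decide), mh_comp]
      exact ih hall' x y k (pend ++ [_]) hk (fun d hd => by
        rcases List.mem_append.mp hd with h | h
        · exact hpd d h
        · simp only [List.mem_singleton] at h; subst h; decide)

theorem joined_toList (tekst : String) :
    (PySem.Str.join "" ((tekst.toList.filter
      (fun x => PySem.Str.isIn (String.ofList [x]) "ZLP0123456789")).map (fun x => String.ofList [x]))).toList
      = tekst.toList.filter predZ := by
  rw [PySem.Str.toList_join, List.map_map]
  rw [show (String.toList ∘ fun x => String.ofList [x]) = (fun c => [c]) from
        funext fun c => by simp [Function.comp, String.toList_ofList]]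
  rw [show ("" : String).toList = [] from rfl]
  rw [show (fun x => PySem.Str.isIn (String.ofList [x]) "ZLP0123456789") = predZ from
        funext fun c => (isIn_singleton c _).trans rfl]
  exact PySem.Chars.join_nil_singletons _

theorem replaced_toList (s : String) :
    (PySem.Str.replace (PySem.Str.replace (PySem.Str.replace s "Z" "PP") "P" ",P,") "L" ",L,").toList
      = s.toList.flatMap expZ := by
  simp only [PySem.Str.toList_replace]
  rw [show ("Z" : String).toList = ['Z'] from rfl, show ("P" : String).toList = ['P'] from rfl,
      show ("L" : String).toList = ['L'] from rfl]
  rw [repl_single, repl_single, repl_single]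
  rw [List.flatMap_assoc, List.flatMap_assoc]
  refine List.flatMap_congr (fun c _ => ?_)
  by_cases hZ : c = 'Z'
  · subst hZ; rfl
  · by_cases hP : c = 'P'
    · subst hP; rfl
    · by_cases hL : c = 'L'
      · subst hL; rfl
      · simp [expZ, hZ, hP, hL]

theorem final_eq (tekst : String) : dziadekDzidek tekst = dziadekDzidek_alt tekst := by
  have hall : ∀ c ∈ tekst.toList.filter predZ, predZ c = true :=
    fun c h => (List.mem_filter.mp h).2
  have hmain := main_sim (tekst.toList.filter predZ) hall 0 0 0 [] (by decide) (by simp)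
  rw [mh_nil] at hmain
  have hd0 : dirZ 0 = (1, 0) := by decide
  -- B side
  have hB : dziadekDzidek_alt tekst
      = bFinish ((tekst.toList.filter predZ).foldl bStep (0, 0, 1, 0, [])) := by
    rw [dziadekDzidek_alt, ← foldl_bStep_filter]
    simp [bFinish, ivalZ, PySem.Int.ofStr?, String.toList_ofList]
  -- A side
  have hA : dziadekDzidek tekst
      = aFinish ((((sp1 ((tekst.toList.filter predZ).flatMap expZ))).filter (· ≠ [])).foldl aStepL (0, 0, 0)) := by
    rw [dziadekDzidek]
    have hsplit : (PySem.Str.split?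
        (PySem.Str.replace (PySem.Str.replace (PySem.Str.replace
          (PySem.Str.join "" ((tekst.toList.filter
            (fun x => PySem.Str.isIn (String.ofList [x]) "ZLP0123456789")).map (fun x => String.ofList [x])))
          "Z" "PP") "P" ",P,") "L" ",L,") ",").getD []
        = (sp1 ((tekst.toList.filter predZ).flatMap expZ)).map String.ofList := by
      rw [PySem.Str.split?, PySem.Chars.split?]
      rw [show (("," : String).toList.isEmpty) = false from rfl]
      simp only [Bool.false_eq_true, if_false, Option.map_some, Option.getD_some]
      rw [show ("," : String).toList = [','] from rfl, splitOn_comma]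
      rw [replaced_toList, joined_toList]
    rw [hsplit]
    rw [List.filter_map]
    rw [show ((fun (x : String) => decide (x ≠ "")) ∘ String.ofList)
          = (fun (t : List Char) => decide (t ≠ [])) from
          funext fun t => by
            simp only [Function.comp, ne_eq]
            exact decide_eq_decide.mpr (not_congr (ofList_eq_iff t []))]
    rw [List.foldl_map]
    rw [show (fun (x : Int × Int × Int) (y : List Char) => aStep x (String.ofList y)) = aStepL from
          funext fun st => funext fun t => aStep_ofList st t]
    rfl
  rw [hA, hB, hd0] at *
  exact hmain.symm

-- ===== VERDICT (by name: the statement is the Claim_ definition above) =====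
theorem dziadekDzidek_spec : Claim_equal_dziadekDzidek := by
  unfold Claim_equal_dziadekDzidek Spec_dziadekDzidek
  intro tekst _
  exact final_eq tekst
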